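-- pv_equiv track=rewrite | github.com/MrCasco/pass-technical-interviews | revenue_milestones.py | getMilestoneDays
-- ===== SOURCE A (Python) =====
-- def getMilestoneDays(revenues, milestones):
--     milestones = sorted([(milestone, i) for i, milestone  in enumerate(milestones)])
--     cur = 0
--     days = 0
--     total_revenue = 0
--     res = [-1]*len(milestones)
--     for revenue in revenues:
--         total_revenue += revenue
--         days += 1
--         if cur < len(milestones):
--             while cur < len(milestones) and total_revenue >= milestones[cur][0]:
--                 index = milestones[cur][1]
--                 res[index] = days
--                 cur += 1
--         else:
--             break
--     return res
-- ===== SOURCE B (Python) =====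
-- def getMilestoneDays(revenues, milestones):
--     prefixes = []
--     total = 0
--     for r in revenues:
--         total += r
--         prefixes.append(total)
--     res = []
--     for m in milestones:
--         day = -1
--         for i, p in enumerate(prefixes):
--             if p >= m:
--                 day = i + 1
--                 break
--         res.append(day)
--     return res
-- ===== Notes on version B (the rewrite author's own statement) =====
-- stated objective: simpler
-- what changed: Replaces the sort+cursor merge sweep over (milestone,index) pairs with a prefix-sum table built once and an independent linear first-match scan per milestone in original order, removing the sorting and index remapping.
import Mathlib
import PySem

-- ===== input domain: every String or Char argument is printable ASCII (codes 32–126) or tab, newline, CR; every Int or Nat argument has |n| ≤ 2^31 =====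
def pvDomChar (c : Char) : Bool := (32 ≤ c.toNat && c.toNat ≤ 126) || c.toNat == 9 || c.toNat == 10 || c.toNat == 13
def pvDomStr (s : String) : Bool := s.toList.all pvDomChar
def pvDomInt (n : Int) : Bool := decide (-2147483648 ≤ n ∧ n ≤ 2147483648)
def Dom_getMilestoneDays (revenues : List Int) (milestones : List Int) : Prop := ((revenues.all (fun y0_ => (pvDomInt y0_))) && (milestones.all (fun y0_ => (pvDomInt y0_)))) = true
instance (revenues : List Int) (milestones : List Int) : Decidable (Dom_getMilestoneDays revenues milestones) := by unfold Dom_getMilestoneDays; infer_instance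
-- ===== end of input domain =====

-- B replaces A's sort-and-cursor sweep by a prefix-sum table plus an independent
-- first-match scan per milestone in original order (simpler; no sort, no index remapping).

-- ===== PORT A =====
-- the inner `while cur < len(milestones) and total_revenue >= milestones[cur][0]` loop:
-- consumes pairs from the sorted list writing res[index] = days; returns (res, remaining pairs).
-- res indices come from enumerate, hence 0 ≤ i < len(res): `.set i.toNat` is exact here.
def pvAWhile (total days : Int) (ms : List (Int × Int)) (res : List Int) : List Int × List (Int × Int) :=
  match ms with
  | [] => (res, [])
  | (m, i) :: rest =>
      if total ≥ m then pvAWhile total days rest (res.set i.toNat days)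
      else (res, (m, i) :: rest)

-- the `for revenue in revenues` loop with its early `break` when the cursor passed the end
def pvALoop (revenues : List Int) (total days : Int) (ms : List (Int × Int)) (res : List Int) : List Int :=
  match revenues with
  | [] => res
  | r :: rs =>
      let total' := total + r
      let days' := days + 1
      match ms with
      | [] => res
      | _ :: _ =>
          let st := pvAWhile total' days' ms res
          pvALoop rs total' days' st.2 st.1

-- Python sorts the (milestone, i) tuples lexicographically; `toLex` on ℤ × ℤ is exactly that order
def getMilestoneDays (revenues : List Int) (milestones : List Int) : List Int :=
  let ms := PySem.List.sorted ((PySem.List.enumerate milestones).map (fun p => (p.2, p.1))) (fun p => toLex p) false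
  pvALoop revenues 0 0 ms (List.replicate milestones.length (-1))

-- ===== PORT B =====
-- `for i, p in enumerate(prefixes): if p >= m: day = i+1; break` with day = -1 default
def pvBFirst (prefixes : List Int) (m : Int) (i : Int) : Int :=
  match prefixes with
  | [] => -1
  | p :: ps => if p ≥ m then i + 1 else pvBFirst ps m (i + 1)

def getMilestoneDays_alt (revenues : List Int) (milestones : List Int) : List Int :=
  let prefixes := (revenues.foldl (fun (st : Int × List Int) r => (st.1 + r, st.2 ++ [st.1 + r])) (0, [])).2
  milestones.map (fun m => pvBFirst prefixes m 0)

-- ===== PRECONDITION & SPEC =====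
def Spec_getMilestoneDays (revenues : List Int) (milestones : List Int) (out : List Int) : Prop := out = getMilestoneDays_alt revenues milestones
instance (revenues : List Int) (milestones : List Int) (out : List Int) : Decidable (Spec_getMilestoneDays revenues milestones out) := by unfold Spec_getMilestoneDays; infer_instance

-- ===== CLAIM (what is proved, stated in full; the proofs are below) =====
def Claim_equal_getMilestoneDays : Prop := ∀ (revenues : List Int) (milestones : List Int), Dom_getMilestoneDays revenues milestones → Spec_getMilestoneDays revenues milestones (getMilestoneDays revenues milestones)

-- ===== LEMMAS AND PROOFS =====

-- first 0-based position k such that t + (sum of the first k+1 of rs) ≥ m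
def pvFirstIdx (t : Int) (rs : List Int) (m : Int) : Option Nat :=
  match rs with
  | [] => none
  | r :: rs => if t + r ≥ m then some 0 else (pvFirstIdx (t + r) rs m).map (· + 1)

def pvPrefixList (t : Int) (rs : List Int) : List Int :=
  match rs with
  | [] => []
  | r :: rs => (t + r) :: pvPrefixList (t + r) rs

-- the intended answer for one milestone
def pvG (revenues : List Int) (m : Int) : Int :=
  match pvFirstIdx 0 revenues m with
  | some k => (k : Int) + 1
  | none => -1

-- the write A performs for one sorted pair, expressed via pvFirstIdx
def pvWrite (t : Int) (rs : List Int) (d : Int) (res : List Int) (p : Int × Int) : List Int :=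
  match pvFirstIdx t rs p.1 with
  | some k => res.set p.2.toNat (d + ((k : Int) + 1))
  | none => res

theorem pvFoldlPrefix (rs : List Int) (t : Int) (acc : List Int) :
    (rs.foldl (fun (st : Int × List Int) r => (st.1 + r, st.2 ++ [st.1 + r])) (t, acc)).2
      = acc ++ pvPrefixList t rs := by
  induction rs generalizing t acc with
  | nil => simp [pvPrefixList]
  | cons r rs ih =>
      rw [List.foldl_cons, ih]
      simp [pvPrefixList]

theorem pvBFirst_spec (rs : List Int) (t m i : Int) :
    pvBFirst (pvPrefixList t rs) m i
      = (match pvFirstIdx t rs m with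
         | some k => i + ((k : Int) + 1)
         | none => -1) := by
  induction rs generalizing t i with
  | nil => simp [pvPrefixList, pvFirstIdx, pvBFirst]
  | cons r rs ih =>
      simp only [pvPrefixList, pvFirstIdx, pvBFirst]
      by_cases h : t + r ≥ m
      · simp [h]
      · simp only [if_neg h, ih]
        cases pvFirstIdx (t + r) rs m with
        | none => simp
        | some k => push_cast; simp; ring

-- B computes pvG pointwise
theorem pvAlt_eq (revenues : List Int) (milestones : List Int) :
    getMilestoneDays_alt revenues milestones = milestones.map (pvG revenues) := by
  unfold getMilestoneDays_alt
  have h := pvFoldlPrefix revenues 0 []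
  simp only [h, List.nil_append]
  refine List.map_congr_left (fun m _ => ?_)
  rw [pvBFirst_spec]
  unfold pvG
  cases pvFirstIdx 0 revenues m with
  | none => rfl
  | some k => simp

-- the while loop is a takeWhile/dropWhile split
theorem pvAWhile_spec (total days : Int) (ms : List (Int × Int)) (res : List Int) :
    pvAWhile total days ms res
      = ((ms.takeWhile (fun p => decide (total ≥ p.1))).foldl
            (fun r p => r.set p.2.toNat days) res,
         ms.dropWhile (fun p => decide (total ≥ p.1))) := by
  induction ms generalizing res with
  | nil => simp [pvAWhile]
  | cons p rest ih =>
      obtain ⟨m, i⟩ := p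
      by_cases h : total ≥ m
      · simp [pvAWhile, h, ih]
      · simp [pvAWhile, h]

theorem pvFold_none (rs' : List Int) (ms : List (Int × Int)) (t d : Int) (res : List Int)
    (hnone : ∀ p ∈ ms, pvFirstIdx t rs' p.1 = none) :
    ms.foldl (pvWrite t rs' d) res = res := by
  induction ms generalizing res with
  | nil => rfl
  | cons p rest ih =>
      simp only [List.foldl_cons]
      rw [show pvWrite t rs' d res p = res from by
            simp [pvWrite, hnone p (by simp)]]
      exact ih _ (fun q hq => hnone q (by simp [hq]))

-- A's day loop, on a list sorted by milestone value, performs exactly the pvFirstIdx writes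
theorem pvALoop_spec (rs : List Int) (ms : List (Int × Int)) (t d : Int) (res : List Int)
    (hs : ms.Pairwise (fun a b => a.1 ≤ b.1)) :
    pvALoop rs t d ms res = ms.foldl (pvWrite t rs d) res := by
  induction rs generalizing ms t d res with
  | nil =>
      rw [pvALoop, pvFold_none]
      intro p _; rfl
  | cons r rs' ih =>
      cases ms with
      | nil => rfl
      | cons p0 rest0 =>
          rw [pvALoop]
          simp only [pvAWhile_spec]
          set ms := p0 :: rest0 with hms
          set tk := ms.takeWhile (fun p => decide (t + r ≥ p.1)) with htk
          set dp := ms.dropWhile (fun p => decide (t + r ≥ p.1)) with hdp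
          have hsplit : ms = tk ++ dp := (List.takeWhile_append_dropWhile).symm
          have hsdp : dp.Pairwise (fun a b => a.1 ≤ b.1) :=
            hs.sublist (hsplit ▸ List.sublist_append_right tk dp)
          rw [ih dp (t + r) (d + 1) _ hsdp]
          conv_rhs => rw [hsplit, List.foldl_append]
          -- taken pairs satisfy t + r ≥ p.1, so pvFirstIdx t (r::rs') p.1 = some 0
          have htkfold : ∀ (init : List Int),
              tk.foldl (fun acc p => acc.set p.2.toNat (d + 1)) init
                = tk.foldl (pvWrite t (r :: rs') d) init := by
            intro init
            refine PySem.List.foldl_congr_mem tk _ _ init (fun acc p hp => ?_)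
            have hge : t + r ≥ p.1 := by
              have := List.mem_takeWhile_imp (htk ▸ hp)
              simpa using this
            simp [pvWrite, pvFirstIdx, hge]
          -- dropped pairs all fail the predicate (the head fails, the rest are ≥ the head)
          have hdpgt : ∀ p ∈ dp, ¬ (t + r ≥ p.1) := by
            intro p hp
            cases hdpc : dp with
            | nil => simp [hdpc] at hp
            | cons q qs =>
                have hqfail : ¬ (t + r ≥ q.1) := by
                  have := List.head?_dropWhile_not (fun p => decide (t + r ≥ p.1)) ms
                  rw [← hdp, hdpc] at this
                  simpa using this
                rw [hdpc] at hp hsdp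
                rcases List.mem_cons.mp hp with h | h
                · exact h ▸ hqfail
                · have hle : q.1 ≤ p.1 := (List.pairwise_cons.mp hsdp).1 p h
                  omega
          have hdpfold : ∀ (init : List Int),
              dp.foldl (pvWrite (t + r) rs' (d + 1)) init
                = dp.foldl (pvWrite t (r :: rs') d) init := by
            intro init
            refine PySem.List.foldl_congr_mem dp _ _ init (fun acc p hp => ?_)
            have hgt := hdpgt p hp
            simp only [pvWrite, pvFirstIdx, if_neg hgt]
            cases pvFirstIdx (t + r) rs' p.1 with
            | none => rfl
            | some k =>
                simp only [Option.map_some]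
                push_cast
                ring_nf
          rw [htkfold, hdpfold]

theorem pvFoldWrite_length (P : List (Int × Int)) (t : Int) (rs : List Int) (d : Int)
    (init : List Int) : (P.foldl (pvWrite t rs d) init).length = init.length := by
  induction P generalizing init with
  | nil => rfl
  | cons p rest ih =>
      simp only [List.foldl_cons]
      rw [ih]
      unfold pvWrite
      cases pvFirstIdx t rs p.1 with
      | none => rfl
      | some k => simp

theorem pvFoldWrite_notkey (P : List (Int × Int)) (t : Int) (rs : List Int) (d : Int)
    (init : List Int) (j : Nat) (hj : ∀ p ∈ P, p.2 ≠ (j : Int)) (hpos : ∀ p ∈ P, 0 ≤ p.2) :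
    (P.foldl (pvWrite t rs d) init)[j]? = init[j]? := by
  induction P generalizing init with
  | nil => rfl
  | cons p rest ih =>
      simp only [List.foldl_cons]
      rw [ih _ (fun q hq => hj q (by simp [hq])) (fun q hq => hpos q (by simp [hq]))]
      unfold pvWrite
      cases pvFirstIdx t rs p.1 with
      | none => rfl
      | some k =>
          refine List.getElem?_set_ne ?_
          have h1 := hj p (by simp)
          have h2 := hpos p (by simp)
          omega

-- pointwise value of the write fold: with distinct non-negative keys each slot is
-- decided by its unique pair
theorem pvFoldWrite_get (P : List (Int × Int)) (revenues : List Int) (n : Nat) (j : Nat)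
    (hjn : j < n) (hkeys : P.Pairwise (fun a b => a.2 ≠ b.2))
    (hpos : ∀ p ∈ P, 0 ≤ p.2) (m : Int) (hmem : (m, (j : Int)) ∈ P) :
    (P.foldl (pvWrite 0 revenues 0) (List.replicate n (-1)))[j]? = some (pvG revenues m) := by
  obtain ⟨P1, P2, rfl⟩ := List.append_of_mem hmem
  have hap := List.pairwise_append.mp hkeys
  have hP2ne : ∀ p ∈ P2, p.2 ≠ (j : Int) := by
    intro p hp
    have := (List.pairwise_cons.mp hap.2.1).1 p hp
    exact fun h => this (by rw [h])
  have hP1ne : ∀ p ∈ P1, p.2 ≠ (j : Int) := by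
    intro p hp
    have := hap.2.2 p hp (m, (j : Int)) (by simp)
    simpa using this
  have hP2pos : ∀ p ∈ P2, 0 ≤ p.2 := fun p hp => hpos p (by simp [hp])
  have hP1pos : ∀ p ∈ P1, 0 ≤ p.2 := fun p hp => hpos p (by simp [hp])
  rw [List.foldl_append, List.foldl_cons]
  rw [pvFoldWrite_notkey P2 _ _ _ _ j hP2ne hP2pos]
  have hX1 : (P1.foldl (pvWrite 0 revenues 0) (List.replicate n (-1)))[j]? = some (-1) := by
    rw [pvFoldWrite_notkey P1 _ _ _ _ j hP1ne hP1pos]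
    simp [hjn]
  have hXlen : (P1.foldl (pvWrite 0 revenues 0) (List.replicate n (-1))).length = n := by
    rw [pvFoldWrite_length]; simp
  set X := P1.foldl (pvWrite 0 revenues 0) (List.replicate n (-1)) with hXdef
  cases h : pvFirstIdx 0 revenues m with
  | none => simp only [pvWrite, pvG, h]; exact hX1
  | some k =>
      simp only [pvWrite, pvG, h]
      rw [show ((j : Int)).toNat = j from by simp]
      rw [List.getElem?_set_self (by omega)]
      norm_num

-- ===== VERDICT (by name: the statement is the Claim_ definition above) =====
theorem getMilestoneDays_spec : Claim_equal_getMilestoneDays := by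
  intro revenues milestones _
  unfold Spec_getMilestoneDays
  rw [pvAlt_eq]
  unfold getMilestoneDays
  set swapped := (PySem.List.enumerate milestones).map (fun p => (p.2, p.1)) with hsw
  set SP := PySem.List.sorted swapped (fun p => toLex p) false with hSP
  have hperm : SP.Perm swapped := PySem.List.sorted_perm _ _ _
  have hfst : SP.Pairwise (fun a b => a.1 ≤ b.1) := by
    have h := PySem.List.sorted_pairwise swapped (fun p => toLex p)
    refine h.imp (fun {a b} hab => ?_)
    rcases Prod.Lex.le_iff.mp hab with h1 | ⟨h1, _⟩
    · exact le_of_lt h1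
    · exact le_of_eq h1
  have hmemsw : ∀ p ∈ swapped, ∃ (k : Nat) (h : k < milestones.length),
      p = (milestones[k], (k : Int)) := by
    intro p hp
    rw [hsw, List.mem_map] at hp
    obtain ⟨q, hq, rfl⟩ := hp
    obtain ⟨k, hk, rfl⟩ := (PySem.List.mem_enumerate_iff _ _ _).mp hq
    exact ⟨k, hk, by simp⟩
  have hpos : ∀ p ∈ SP, 0 ≤ p.2 := by
    intro p hp
    obtain ⟨k, hk, rfl⟩ := hmemsw p (hperm.mem_iff.mp hp)
    simp
  have hkeys : SP.Pairwise (fun a b => a.2 ≠ b.2) := by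
    have hnod : (SP.map (fun p => p.2)).Nodup := by
      refine ((hperm.map (fun p => p.2)).nodup_iff).mpr ?_
      rw [hsw, List.map_map]
      have : ((PySem.List.enumerate milestones).map
          ((fun (p : Int × Int) => p.2) ∘ (fun (p : Int × Int) => (p.2, p.1))))
          = (PySem.List.enumerate milestones).map (fun p => p.1) := by
        simp [Function.comp]
      rw [this, PySem.List.map_fst_enumerate]
      exact PySem.List.nodup_pyRange_one _ _
    rw [List.nodup_iff_pairwise_ne, List.pairwise_map] at hnod
    exact hnod
  rw [pvALoop_spec revenues SP 0 0 _ hfst]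
  refine List.ext_getElem? (fun j => ?_)
  by_cases hj : j < milestones.length
  · have hmem : (milestones[j], (j : Int)) ∈ SP := by
      rw [hperm.mem_iff, hsw, List.mem_map]
      refine ⟨((j : Int), milestones[j]), ?_, rfl⟩
      rw [PySem.List.mem_enumerate_iff]
      exact ⟨j, hj, by simp⟩
    rw [pvFoldWrite_get SP revenues milestones.length j hj hkeys hpos milestones[j] hmem]
    rw [List.getElem?_map, List.getElem?_eq_getElem hj]
    rfl
  · have h1 : (SP.foldl (pvWrite 0 revenues 0) (List.replicate milestones.length (-1)))[j]? = none :=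
      List.getElem?_eq_none (by rw [pvFoldWrite_length, List.length_replicate]; omega)
    have h2 : (milestones.map (pvG revenues))[j]? = none :=
      List.getElem?_eq_none (by rw [List.length_map]; omega)
    rw [h1, h2]
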